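-- pv_equiv track=rewrite | github.com/PTW-TUDa/eta-nexus | eta_nexus/connections/smard_connection.py | _find_closest_timestamp
-- ===== SOURCE A (Python) =====
-- def _find_closest_timestamp(
--
--     target_ms: int,
--     available_timestamps: list[int],
--     direction: str = "before",
-- ) -> int | None:
--     """Find closest available timestamp to target.
--
--     :param target_ms: Target timestamp in milliseconds
--     :param available_timestamps: List of available timestamps
--     :param direction: 'before' (<=) or 'after' (>=)
--     :return: Closest timestamp or None
--     """
--     if not available_timestamps:
--         return None
--
--     if direction == "before":
--         # Find largest timestamp <= target
--         valid = [ts for ts in available_timestamps if ts <= target_ms]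
--         return max(valid) if valid else None
--     # Find smallest timestamp >= target
--     valid = [ts for ts in available_timestamps if ts >= target_ms]
--     return min(valid) if valid else None
-- ===== SOURCE B (Python) =====
-- def _find_closest_timestamp(
--     target_ms: int,
--     available_timestamps: list[int],
--     direction: str = "before",
-- ) -> int | None:
--     """Single-pass: keep one running best instead of building a filtered list."""
--     if direction == "before":
--         best = None
--         for ts in available_timestamps:
--             if ts <= target_ms:
--                 if best is None or best < ts:
--                     best = ts
--         return best
--     best = None
--     for ts in available_timestamps:
--         if ts >= target_ms:
--             if best is None or ts < best:
--                 best = ts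
--     return best
-- ===== Notes on version B (the rewrite author's own statement) =====
-- stated objective: simpler
-- what changed: Replaced the build-a-filtered-list-then-max/min two-phase computation with one fused loop that threads a single running-best accumulator (None initially) over the timestamps, so no intermediate list is built.
import Mathlib
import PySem

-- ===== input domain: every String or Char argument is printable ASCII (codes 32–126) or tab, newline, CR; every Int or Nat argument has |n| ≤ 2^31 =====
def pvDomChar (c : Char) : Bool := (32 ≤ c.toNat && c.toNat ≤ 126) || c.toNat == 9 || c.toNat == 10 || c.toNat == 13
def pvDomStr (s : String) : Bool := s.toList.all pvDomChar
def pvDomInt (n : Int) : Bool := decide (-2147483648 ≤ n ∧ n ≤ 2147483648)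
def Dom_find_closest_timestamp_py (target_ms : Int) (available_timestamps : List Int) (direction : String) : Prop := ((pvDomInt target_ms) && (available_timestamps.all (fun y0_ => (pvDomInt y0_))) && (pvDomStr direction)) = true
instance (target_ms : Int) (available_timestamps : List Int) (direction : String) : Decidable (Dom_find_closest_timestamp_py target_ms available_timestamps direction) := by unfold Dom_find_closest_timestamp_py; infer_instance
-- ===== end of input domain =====

-- B fuses A's filter-then-max/min into one single pass carrying a running best (simpler: no intermediate list).


-- ===== PORT A =====
def find_closest_timestamp_py (target_ms : Int) (available_timestamps : List Int) (direction : String) : Option Int :=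
  if available_timestamps = [] then none
  else if direction = "before" then
    let valid := available_timestamps.filter (fun ts => ts ≤ target_ms)
    if valid ≠ [] then PySem.List.max? valid (fun x => x) else none
  else
    let valid := available_timestamps.filter (fun ts => target_ms ≤ ts)
    if valid ≠ [] then PySem.List.min? valid (fun x => x) else none

-- ===== PORT B =====
def find_closest_timestamp_py_alt (target_ms : Int) (available_timestamps : List Int) (direction : String) : Option Int :=
  if direction = "before" then
    available_timestamps.foldl
      (fun best ts =>
        if ts ≤ target_ms then
          match best with
          | none => some ts
          | some b => if b < ts then some ts else best
        else best) none
  else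
    available_timestamps.foldl
      (fun best ts =>
        if target_ms ≤ ts then
          match best with
          | none => some ts
          | some b => if ts < b then some ts else best
        else best) none

-- ===== PRECONDITION & SPEC =====
def Spec_find_closest_timestamp_py (target_ms : Int) (available_timestamps : List Int) (direction : String) (out : Option Int) : Prop := out = find_closest_timestamp_py_alt target_ms available_timestamps direction
instance (target_ms : Int) (available_timestamps : List Int) (direction : String) (out : Option Int) : Decidable (Spec_find_closest_timestamp_py target_ms available_timestamps direction out) := by unfold Spec_find_closest_timestamp_py; infer_instance

-- ===== CLAIM (what is proved, stated in full; the proofs are below) =====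
def Claim_equal_find_closest_timestamp_py : Prop := ∀ (target_ms : Int) (available_timestamps : List Int) (direction : String), Dom_find_closest_timestamp_py target_ms available_timestamps direction → Spec_find_closest_timestamp_py target_ms available_timestamps direction (find_closest_timestamp_py target_ms available_timestamps direction)

-- ===== LEMMAS AND PROOFS =====

theorem foldB_some (t : Int) : ∀ (xs : List Int) (b : Int),
    xs.foldl (fun best ts =>
        if ts ≤ t then
          match best with
          | none => some ts
          | some b => if b < ts then some ts else best
        else best) (some b)
      = some ((xs.filter (fun ts => ts ≤ t)).foldl max b) := by
  intro xs
  induction xs with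
  | nil => intro b; simp
  | cons x xs ih =>
    intro b
    by_cases hx : x ≤ t
    · simp only [List.foldl_cons, List.filter_cons, hx, if_pos, decide_true]
      have hmax : (if b < x then some x else some b) = some (max b x) := by
        split_ifs with hb
        · rw [max_eq_right hb.le]
        · rw [max_eq_left (not_lt.mp hb)]
      rw [hmax, ih]
    · simp only [List.foldl_cons, List.filter_cons, hx, decide_false]
      exact ih b

theorem foldB_none (t : Int) : ∀ (xs : List Int),
    xs.foldl (fun best ts =>
        if ts ≤ t then
          match best with
          | none => some ts
          | some b => if b < ts then some ts else best
        else best) none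
      = PySem.List.max? (xs.filter (fun ts => ts ≤ t)) (fun x => x) := by
  intro xs
  induction xs with
  | nil => simp [PySem.List.max?]
  | cons x xs ih =>
    by_cases hx : x ≤ t
    · simp only [List.foldl_cons, List.filter_cons, hx, if_pos, decide_true]
      rw [foldB_some, PySem.List.max?_id_cons]
    · simp only [List.foldl_cons, List.filter_cons, hx, decide_false]
      exact ih

theorem foldA_some (t : Int) : ∀ (xs : List Int) (b : Int),
    xs.foldl (fun best ts =>
        if t ≤ ts then
          match best with
          | none => some ts
          | some b => if ts < b then some ts else best
        else best) (some b)
      = some ((xs.filter (fun ts => t ≤ ts)).foldl min b) := by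
  intro xs
  induction xs with
  | nil => intro b; simp
  | cons x xs ih =>
    intro b
    by_cases hx : t ≤ x
    · simp only [List.foldl_cons, List.filter_cons, hx, if_pos, decide_true]
      have hmin : (if x < b then some x else some b) = some (min b x) := by
        split_ifs with hb
        · rw [min_eq_right hb.le]
        · rw [min_eq_left (not_lt.mp hb)]
      rw [hmin, ih]
    · simp only [List.foldl_cons, List.filter_cons, hx, decide_false]
      exact ih b

theorem foldA_none (t : Int) : ∀ (xs : List Int),
    xs.foldl (fun best ts =>
        if t ≤ ts then
          match best with
          | none => some ts
          | some b => if ts < b then some ts else best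
        else best) none
      = PySem.List.min? (xs.filter (fun ts => t ≤ ts)) (fun x => x) := by
  intro xs
  induction xs with
  | nil => simp [PySem.List.min?]
  | cons x xs ih =>
    by_cases hx : t ≤ x
    · simp only [List.foldl_cons, List.filter_cons, hx, if_pos, decide_true]
      rw [foldA_some, PySem.List.min?_id_cons]
    · simp only [List.foldl_cons, List.filter_cons, hx, decide_false]
      exact ih

-- ===== VERDICT (by name: the statement is the Claim_ definition above) =====
theorem find_closest_timestamp_py_spec : Claim_equal_find_closest_timestamp_py := by
  intro t xs d _
  unfold Spec_find_closest_timestamp_py find_closest_timestamp_py find_closest_timestamp_py_alt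
  by_cases hd : d = "before"
  · simp only [hd, if_pos, foldB_none]
    by_cases hxs : xs = []
    · simp [hxs, PySem.List.max?]
    · simp only [hxs, if_false]
      by_cases hv : xs.filter (fun ts => ts ≤ t) = []
      · simp [hv, PySem.List.max?]
      · simp [hv]
  · simp only [hd, if_false, foldA_none]
    by_cases hxs : xs = []
    · simp [hxs, PySem.List.min?]
    · simp only [hxs, if_false]
      by_cases hv : xs.filter (fun ts => t ≤ ts) = []
      · simp [hv, PySem.List.min?]
      · simp [hv]
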